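-- pv_equiv track=rewrite | github.com/ubx/Flaps_and_Speed_Display | extra_scripts/fix_include_flag.py | scrub_flags
-- ===== SOURCE A (Python) =====
-- BAD = "lvgl_port_alignment.h"
--
-- def scrub_flags(flags):
--     if isinstance(flags, str):
--         parts = flags.split()
--     else:
--         parts = list(flags)
--
--     out = []
--     i = 0
--     while i < len(parts):
--         a = parts[i]
--
--         # remove broken "-include" without a path
--         if a == "-include":
--             nxt = parts[i+1] if i+1 < len(parts) else None
--             if nxt is None or nxt.startswith("-"):
--                 i += 1
--                 continue
--             # drop the lvgl header include pair too
--             if nxt.endswith("/" + BAD) or nxt == BAD: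
--                 i += 2
--                 continue
--             out.extend([a, nxt])
--             i += 2
--             continue
--
--         # drop accidental header appearing as an input file
--         if a.endswith("/" + BAD) or a == BAD:
--             i += 1
--             continue
--
--         out.append(a)
--         i += 1
--     return out
-- ===== SOURCE B (Python) =====
-- BAD = "lvgl_port_alignment.h"
--
-- def scrub_flags(flags):
--     if isinstance(flags, str):
--         parts = flags.split()
--     else:
--         parts = list(flags)
--
--     out = []
--     pending_include = False
--     for tok in parts:
--         if pending_include:
--             pending_include = False
--             if tok.startswith("-"):
--                 pass  # the lone "-include" is dropped; reprocess tok normally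
--             elif tok.endswith("/" + BAD) or tok == BAD:
--                 continue  # drop the whole broken include pair
--             else:
--                 out.append("-include")
--                 out.append(tok)
--                 continue
--         if tok == "-include":
--             pending_include = True
--         elif tok.endswith("/" + BAD) or tok == BAD:
--             pass  # drop accidental header appearing as an input file
--         else:
--             out.append(tok)
--     return out
-- ===== Notes on version B (the rewrite author's own statement) =====
-- stated objective: simpler
-- what changed: Replaced the index-based while loop with i+=2 lookahead jumps by a single forward for-loop over the tokens that maintains a pending_include boolean state; a still-pending '-include' at the end is simply dropped.
import Mathlib
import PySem

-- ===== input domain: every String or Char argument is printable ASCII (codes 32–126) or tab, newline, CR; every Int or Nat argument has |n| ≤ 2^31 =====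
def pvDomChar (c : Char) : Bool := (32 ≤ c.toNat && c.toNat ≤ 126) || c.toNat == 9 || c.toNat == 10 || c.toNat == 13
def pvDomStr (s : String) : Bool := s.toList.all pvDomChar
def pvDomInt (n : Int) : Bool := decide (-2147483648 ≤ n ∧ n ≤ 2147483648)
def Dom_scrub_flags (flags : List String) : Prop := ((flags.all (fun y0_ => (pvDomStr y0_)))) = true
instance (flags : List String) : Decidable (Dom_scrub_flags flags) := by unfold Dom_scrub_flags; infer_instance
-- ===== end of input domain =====

-- ===== PORT A =====
-- B replaces A's index/lookahead while-loop by a one-pass loop with a pending flag (simpler decomposition, same cost).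
def pvBAD : String := "lvgl_port_alignment.h"

-- literal port of A's while-loop: structural recursion over the remaining tokens
-- (the index i only moves forward, so the suffix parts[i:] is the loop state)
def scrub_flags (flags : List String) : List String :=
  match flags with
  | [] => []
  | a :: rest =>
    if a = "-include" then
      match rest with
      | [] => []  -- nxt is None: i += 1, loop ends
      | nxt :: rest' =>
        if PySem.Str.startswith nxt "-" = true then scrub_flags (nxt :: rest')
        else if PySem.Str.endswith nxt ("/" ++ pvBAD) = true ∨ nxt = pvBAD then scrub_flags rest'
        else a :: nxt :: scrub_flags rest'
    else if PySem.Str.endswith a ("/" ++ pvBAD) = true ∨ a = pvBAD then scrub_flags rest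
    else a :: scrub_flags rest
termination_by flags.length
decreasing_by all_goals simp

-- ===== PORT B =====
-- one loop step of Source B: state = (out, pending_include)
def pvStep (st : List String × Bool) (tok : String) : List String × Bool :=
  let normal : List String × Bool :=
    if tok = "-include" then (st.1, true)
    else if PySem.Str.endswith tok ("/" ++ pvBAD) = true ∨ tok = pvBAD then (st.1, false)
    else (st.1 ++ [tok], false)
  if st.2 then
    if PySem.Str.startswith tok "-" = true then normal
    else if PySem.Str.endswith tok ("/" ++ pvBAD) = true ∨ tok = pvBAD then (st.1, false)
    else (st.1 ++ ["-include", tok], false)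
  else normal

def scrub_flags_alt (flags : List String) : List String :=
  (flags.foldl pvStep ([], false)).1

-- ===== PRECONDITION & SPEC =====
def Spec_scrub_flags (flags : List String) (out : List String) : Prop := out = scrub_flags_alt flags
instance (flags : List String) (out : List String) : Decidable (Spec_scrub_flags flags out) := by unfold Spec_scrub_flags; infer_instance

-- ===== CLAIM (what is proved, stated in full; the proofs are below) =====
def Claim_equal_scrub_flags : Prop := ∀ (flags : List String), Dom_scrub_flags flags → Spec_scrub_flags flags (scrub_flags flags)

-- ===== LEMMAS AND PROOFS =====

-- Joint loop invariant: starting Source B's loop on l with pending_include = false accumulates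
-- out ++ scrub_flags l; with pending_include = true it behaves as if "-include" preceded l.
theorem pvFold_inv (l : List String) :
    (∀ out : List String, (l.foldl pvStep (out, false)).1 = out ++ scrub_flags l) ∧
    (∀ out : List String, (l.foldl pvStep (out, true)).1 = out ++ scrub_flags ("-include" :: l)) := by
  induction l with
  | nil =>
    refine ⟨fun out => by simp [scrub_flags], fun out => ?_⟩
    rw [scrub_flags.eq_def]; simp
  | cons tok rest ih =>
    have hmain : ∀ out : List String,
        ((tok :: rest).foldl pvStep (out, false)).1 = out ++ scrub_flags (tok :: rest) := by
      intro out
      by_cases h1 : tok = "-include"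
      · subst h1
        simpa [List.foldl, pvStep] using ih.2 out
      · rw [scrub_flags.eq_def]
        by_cases h2 : PySem.Chars.endswith tok.toList ('/' :: pvBAD.toList) = true ∨ tok = pvBAD
        · simpa [List.foldl, pvStep, h1, h2] using ih.1 out
        · simpa [List.foldl, pvStep, h1, h2] using ih.1 (out ++ [tok])
    refine ⟨hmain, fun out => ?_⟩
    by_cases hs : PySem.Chars.startswith tok.toList ['-'] = true
    · -- fall through: reprocess tok with pending cleared
      have hfold : (tok :: rest).foldl pvStep (out, true) = (tok :: rest).foldl pvStep (out, false) := by
        simp [List.foldl, pvStep, hs]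
      have hA : scrub_flags ("-include" :: tok :: rest) = scrub_flags (tok :: rest) := by
        rw [scrub_flags.eq_def]; simp [hs]
      rw [hfold, hmain out, hA]
    · have hni : ¬ tok = "-include" := by
        intro h; subst h; exact hs (by decide)
      have hA : scrub_flags ("-include" :: tok :: rest)
          = if PySem.Chars.endswith tok.toList ('/' :: pvBAD.toList) = true ∨ tok = pvBAD
            then scrub_flags rest else "-include" :: tok :: scrub_flags rest := by
        rw [scrub_flags.eq_def]; simp [hs]
      rw [hA]
      by_cases h2 : PySem.Chars.endswith tok.toList ('/' :: pvBAD.toList) = true ∨ tok = pvBAD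
      · simpa [List.foldl, pvStep, hs, hni, h2] using ih.1 out
      · simpa [List.foldl, pvStep, hs, hni, h2] using ih.1 (out ++ ["-include", tok])

-- ===== VERDICT (by name: the statement is the Claim_ definition above) =====
theorem scrub_flags_spec : Claim_equal_scrub_flags := by
  intro flags _
  unfold Spec_scrub_flags scrub_flags_alt
  simpa using ((pvFold_inv flags).1 []).symm
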